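-- pv_equiv track=rewrite | github.com/rajverma328/COC-IITK | BACK_END/course_schedule.py | extract_last_bracket_content
-- ===== SOURCE A (Python) =====
-- def extract_last_bracket_content(course_name):
--     # Find all occurrences of content in brackets
--     brackets = []
--     start = 0
--     while True:
--         start = course_name.find('(', start)
--         if start == -1:
--             break
--         end = course_name.find(')', start)
--         if end == -1:
--             break
--         brackets.append(course_name[start + 1:end])
--         start = end + 1
--     return brackets[-1] if brackets else None
-- ===== SOURCE B (Python) =====
-- def extract_last_bracket_content(course_name):
--     # One-pass state machine: collect chars after an opening '(' until the
--     # matching-first ')' and remember the most recent completed group.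
--     last = None
--     buf = None
--     for c in course_name:
--         if buf is None:
--             if c == '(':
--                 buf = []
--         elif c == ')':
--             last = ''.join(buf)
--             buf = None
--         else:
--             buf.append(c)
--     return last
-- ===== Notes on version B (the rewrite author's own statement) =====
-- stated objective: alternative
-- what changed: Replaced the repeated str.find index-juggling while-loop with a single left-to-right character state machine (buffer open/closed) that remembers the last completed group.
import Mathlib
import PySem

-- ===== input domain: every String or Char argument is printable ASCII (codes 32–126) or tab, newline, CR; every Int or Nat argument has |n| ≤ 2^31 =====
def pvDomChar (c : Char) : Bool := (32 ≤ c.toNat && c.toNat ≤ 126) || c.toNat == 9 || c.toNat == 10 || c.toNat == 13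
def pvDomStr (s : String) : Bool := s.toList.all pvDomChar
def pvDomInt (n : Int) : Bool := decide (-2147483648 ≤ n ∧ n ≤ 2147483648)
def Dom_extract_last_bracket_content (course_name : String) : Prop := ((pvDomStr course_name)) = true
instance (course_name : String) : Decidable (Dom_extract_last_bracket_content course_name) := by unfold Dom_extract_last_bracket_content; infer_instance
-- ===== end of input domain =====

-- B replaces A's repeated str.find/index while-loop by a one-pass character
-- state machine (objective: alternative — same O(n) cost, different traversal).

-- ===== PORT A =====
-- A's while-loop: find '(' from start, find ')' from there, slice, jump past.
-- Fuel (cs.length + 1) only makes the recursion total; it is never exhausted.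
def aLoop : Nat → List Char → Nat → List (List Char) → List (List Char)
  | 0, _, _, acc => acc
  | fuel+1, cs, start, acc =>
    let s := PySem.Chars.findFrom cs ['('] (start : Int)
    if s = -1 then acc
    else
      let e := PySem.Chars.findFrom cs [')'] s
      if e = -1 then acc
      else aLoop fuel cs (e.toNat + 1) (acc ++ [PySem.Chars.slice cs (some (s + 1)) (some e)])

def extract_last_bracket_content (course_name : String) : Option String :=
  let cs := course_name.toList
  let brackets := aLoop (cs.length + 1) cs 0 []
  -- brackets[-1] if brackets else None
  if brackets = [] then none else (PySem.List.pyGet? brackets (-1)).map String.ofList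

-- ===== PORT B =====
-- B's state machine: buf = none (outside a group) / some b (collecting b).
def bLoop : List Char → Option (List Char) → Option (List Char) → Option (List Char)
  | [], _, last => last
  | c :: rest, none, last => if c = '(' then bLoop rest (some []) last else bLoop rest none last
  | c :: rest, some b, last =>
      if c = ')' then bLoop rest none (some b) else bLoop rest (some (b ++ [c])) last

def extract_last_bracket_content_alt (course_name : String) : Option String :=
  (bLoop course_name.toList none none).map String.ofList

-- ===== PRECONDITION & SPEC =====
def Spec_extract_last_bracket_content (course_name : String) (out : Option String) : Prop := out = extract_last_bracket_content_alt course_name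
instance (course_name : String) (out : Option String) : Decidable (Spec_extract_last_bracket_content course_name out) := by unfold Spec_extract_last_bracket_content; infer_instance

-- ===== CLAIM (what is proved, stated in full; the proofs are below) =====
def Claim_equal_extract_last_bracket_content : Prop := ∀ (course_name : String), Dom_extract_last_bracket_content course_name → Spec_extract_last_bracket_content course_name (extract_last_bracket_content course_name)

-- ===== LEMMAS AND PROOFS =====

-- Common structural reference: the list of all group contents, in order.
def scanG : List Char → Option (List Char) → List (List Char)
  | [], _ => []
  | c :: rest, none => if c = '(' then scanG rest (some []) else scanG rest none
  | c :: rest, some b => if c = ')' then b :: scanG rest none else scanG rest (some (b ++ [c]))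

lemma singleton_prefix_drop {x : Char} {u : List Char} {i : Nat} (hi : i < u.length)
    (hx : u[i] = x) : [x] <+: u.drop i := by
  rw [List.drop_eq_getElem_cons hi, hx]
  exact ⟨u.drop (i+1), rfl⟩

lemma not_mem_take_of_min {x : Char} {u : List Char} {j : Nat}
    (h : ∀ i < j, ¬ [x] <+: u.drop i) : x ∉ u.take j := by
  intro hx
  obtain ⟨i, hi, hget⟩ := List.mem_iff_getElem.mp hx
  have hij : i < j := lt_of_lt_of_le hi (by simp)
  have hiu : i < u.length := by
    have := hi; simp [List.length_take] at this; omega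
  exact h i hij (singleton_prefix_drop hiu (by simpa [List.getElem_take] using hget))

lemma scanG_no_open {u : List Char} (h : '(' ∉ u) : scanG u none = [] := by
  induction u with
  | nil => rfl
  | cons c rest ih =>
    simp only [List.mem_cons, not_or] at h
    simp [scanG, Ne.symm h.1, ih h.2]

lemma scanG_skip {w u : List Char} (h : '(' ∉ w) : scanG (w ++ u) none = scanG u none := by
  induction w with
  | nil => rfl
  | cons c rest ih =>
    simp only [List.mem_cons, not_or] at h
    simp [scanG, Ne.symm h.1, ih h.2]

lemma scanG_no_close {v : List Char} (b : List Char) (h : ')' ∉ v) : scanG v (some b) = [] := by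
  induction v generalizing b with
  | nil => rfl
  | cons c rest ih =>
    simp only [List.mem_cons, not_or] at h
    simp [scanG, Ne.symm h.1, ih _ h.2]

lemma scanG_close {w r : List Char} (b : List Char) (h : ')' ∉ w) :
    scanG (w ++ ')' :: r) (some b) = (b ++ w) :: scanG r none := by
  induction w generalizing b with
  | nil => simp [scanG]
  | cons c rest ih =>
    simp only [List.mem_cons, not_or] at h
    simp [scanG, Ne.symm h.1, ih _ h.2]

lemma bLoop_eq (u : List Char) : ∀ buf last, bLoop u buf last = ((scanG u buf).getLast?).or last := by
  induction u with
  | nil => intro buf last; cases buf <;> rfl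
  | cons c rest ih =>
    intro buf last
    cases buf with
    | none =>
      by_cases h : c = '('
      · simp [bLoop, scanG, h, ih]
      · simp [bLoop, scanG, h, ih]
    | some b =>
      by_cases h : c = ')'
      · simp [bLoop, scanG, h, ih, List.getLast?_cons]
      · simp [bLoop, scanG, h, ih]

lemma aLoop_eq (cs : List Char) : ∀ fuel start acc, start ≤ cs.length → cs.length - start < fuel →
    aLoop fuel cs start acc = acc ++ scanG (cs.drop start) none := by
  intro fuel
  induction fuel with
  | zero => intro start acc h1 h2; omega
  | succ fuel ih =>
    intro start acc hstart hfuel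
    rw [aLoop]
    rw [PySem.Chars.findFrom_natCast cs ['('] start hstart]
    set u := cs.drop start with hu
    have hulen : u.length = cs.length - start := by simp [hu]
    by_cases hopen : PySem.Chars.find u ['('] = -1
    · have hmem : '(' ∉ u := fun hm =>
        (PySem.Chars.find_eq_neg_one_iff u ['(']).mp hopen ((List.singleton_infix_iff _ _).mpr hm)
      simp [hopen, scanG_no_open hmem]
    · have h0 : 0 ≤ PySem.Chars.find u ['('] := by
        have := PySem.Chars.neg_one_le_find u ['(']; omega
      set j := (PySem.Chars.find u ['(']).toNat with hjdef
      have hjcast : PySem.Chars.find u ['('] = (j : Int) := (Int.toNat_of_nonneg h0).symm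
      obtain ⟨hpre, hmin⟩ := PySem.Chars.find_spec (s := u) (sub := ['(']) h0
      obtain ⟨t, ht⟩ := hpre
      simp only [List.singleton_append] at ht
      rw [← hjdef] at ht hmin
      have hdj : u.drop j = '(' :: t := ht.symm
      have hjlt : j < u.length := by
        by_contra hc
        have h' : u.drop j = [] := List.drop_eq_nil_of_le (Nat.le_of_not_lt hc)
        simp [h'] at hdj
      have hsj : start + j ≤ cs.length := by omega
      have hcsdrop : cs.drop (start + j) = '(' :: t := by
        rw [← hdj, hu, List.drop_drop]
      have htlen : t.length = u.length - j - 1 := by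
        have := congrArg List.length hdj; simp at this; omega
      have hnotopen : '(' ∉ u.take j := not_mem_take_of_min hmin
      -- rewrite the branch value
      rw [if_neg hopen, hjcast]
      have hcast1 : (start : Int) + (j : Int) = ((start + j : Nat) : Int) := by push_cast; ring
      rw [if_neg (by omega), hcast1]
      rw [PySem.Chars.findFrom_natCast cs [')'] (start + j) hsj, hcsdrop]
      by_cases hclose : PySem.Chars.find ('(' :: t) [')'] = -1
      · have hmem2 : ')' ∉ ('(' :: t) := fun hm =>
          (PySem.Chars.find_eq_neg_one_iff _ [')']).mp hclose ((List.singleton_infix_iff _ _).mpr hm)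
        have hmemt : ')' ∉ t := fun hm => hmem2 (List.mem_cons_of_mem _ hm)
        rw [if_pos (by simp [hclose])]
        have : scanG u none = [] := by
          rw [← List.take_append_drop j u, hdj, scanG_skip hnotopen]
          simp [scanG, scanG_no_close [] hmemt]
        simp [this]
      · have h0' : 0 ≤ PySem.Chars.find ('(' :: t) [')'] := by
          have := PySem.Chars.neg_one_le_find ('(' :: t) [')']; omega
        set k := (PySem.Chars.find ('(' :: t) [')']).toNat with hkdef
        have hkcast : PySem.Chars.find ('(' :: t) [')'] = (k : Int) := (Int.toNat_of_nonneg h0').symm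
        obtain ⟨hpre2, hmin2⟩ := PySem.Chars.find_spec (s := '(' :: t) (sub := [')']) h0'
        obtain ⟨r, hr⟩ := hpre2
        simp only [List.singleton_append] at hr
        rw [← hkdef] at hr hmin2
        have hk1 : 1 ≤ k := by
          rcases Nat.eq_zero_or_pos k with h | h
          · exfalso; rw [h] at hr; simp at hr
          · omega
        have hdk : t.drop (k - 1) = ')' :: r := by
          rw [hr]
          have hk : k = (k - 1) + 1 := by omega
          conv_rhs => rw [hk]
          simp
        have hklt : k - 1 < t.length := by
          by_contra hc
          have : t.drop (k - 1) = [] := List.drop_eq_nil_of_le (by omega)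
          simp [this] at hdk
        have hnotclose : ')' ∉ t.take (k - 1) := by
          have h' : ')' ∉ ('(' :: t).take k := not_mem_take_of_min hmin2
          have hk : k = (k - 1) + 1 := by omega
          rw [hk] at h'; simp only [List.take_succ_cons, List.mem_cons, not_or] at h'
          exact h'.2
        rw [if_neg hclose, hkcast]
        have hcast2 : ((start + j : Nat) : Int) + (k : Int) = ((start + j + k : Nat) : Int) := by
          push_cast; ring
        rw [if_neg (by omega), hcast2]
        have htoNat : ((start + j + k : Nat) : Int).toNat = start + j + k := by omega
        rw [htoNat]
        have hslice : PySem.Chars.slice cs (some (((start + j : Nat) : Int) + 1))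
            (some ((start + j + k : Nat) : Int)) = t.take (k - 1) := by
          have hc3 : ((start + j : Nat) : Int) + 1 = ((start + j + 1 : Nat) : Int) := by push_cast; ring
          rw [hc3, PySem.Chars.slice_eq_listSlice, PySem.List.slice_natCast]
          have hdrop1 : cs.drop (start + j + 1) = t := by
            have := congrArg (List.drop 1) hcsdrop
            simpa [List.drop_drop, Nat.add_comm] using this
          rw [hdrop1]
          congr 1; omega
        rw [hslice]
        have hrec : cs.drop (start + j + k + 1) = r := by
          have hdrop1 : cs.drop (start + j + 1) = t := by
            have := congrArg (List.drop 1) hcsdrop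
            simpa [List.drop_drop, Nat.add_comm] using this
          have : cs.drop (start + j + k + 1) = t.drop k := by
            rw [← hdrop1, List.drop_drop]; congr 1; omega
          rw [this]
          have hk : k = (k - 1) + 1 := by omega
          rw [hk, ← List.drop_drop, hdk]; simp
        rw [ih (start + j + k + 1) _ (by omega) (by omega), hrec]
        have hscan : scanG u none = t.take (k - 1) :: scanG r none := by
          rw [← List.take_append_drop j u, hdj, scanG_skip hnotopen]
          have : scanG ('(' :: t) none = scanG t (some []) := by simp [scanG]
          rw [this]
          conv_lhs => rw [← List.take_append_drop (k - 1) t, hdk]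
          rw [scanG_close [] hnotclose]
          simp
        rw [hscan]
        simp

lemma pyGet_neg_one {α : Type} (l : List α) (h : l ≠ []) :
    PySem.List.pyGet? l (-1) = l.getLast? := by
  have hl : 1 ≤ l.length := by cases l <;> simp_all
  simp [PySem.List.pyGet?, PySem.List.pyIdx?, hl, List.getLast?_eq_getElem?]

-- ===== VERDICT (by name: the statement is the Claim_ definition above) =====
theorem extract_last_bracket_content_spec : Claim_equal_extract_last_bracket_content := by
  intro s _
  unfold Spec_extract_last_bracket_content extract_last_bracket_content extract_last_bracket_content_alt
  simp only [bLoop_eq,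
    aLoop_eq s.toList (s.toList.length + 1) 0 [] (by omega) (by omega)]
  simp only [List.drop_zero, List.nil_append, Option.or_none]
  by_cases h : scanG s.toList none = []
  · simp [h]
  · simp [h, pyGet_neg_one _ h]
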